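-- pv_equiv track=rewrite | github.com/dataesr/harvest-patstat | p07b_clean_participants_entp.py | get_initial_info
-- ===== SOURCE A (Python) =====
-- def get_initial_info(text):
--     """ This function tests if the string contains initials : names of persons with initials alone like 'P. Andrews'
--
--     param text: the string to be tested for initials
--     type text: string
--
--     :return: a boolean that returns True if there is at least one initial in the string, False otherwise
--
--     """
--
--     list_words = text.split(' ')
--     list_init = [mot for mot in list_words if len(mot) == 1]
--     if list_init:
--         init = True
--     else:
--         init = False
--
--     return init
-- ===== SOURCE B (Python) =====
-- def get_initial_info(text):
--     # One pass over the characters: track the length of the current space-separated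
--     # token; a token of length exactly 1 means an initial. Short-circuits; no list.
--     run = 0
--     for ch in text:
--         if ch == ' ':
--             if run == 1:
--                 return True
--             run = 0
--         else:
--             run += 1
--     return run == 1
-- ===== Notes on version B (the rewrite author's own statement) =====
-- stated objective: alternative
-- what changed: Replaced the split-on-space + list-comprehension filter + truthiness test with a single character scan that tracks the current token length and short-circuits on the first length-1 token, building no intermediate lists.
import Mathlib
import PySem

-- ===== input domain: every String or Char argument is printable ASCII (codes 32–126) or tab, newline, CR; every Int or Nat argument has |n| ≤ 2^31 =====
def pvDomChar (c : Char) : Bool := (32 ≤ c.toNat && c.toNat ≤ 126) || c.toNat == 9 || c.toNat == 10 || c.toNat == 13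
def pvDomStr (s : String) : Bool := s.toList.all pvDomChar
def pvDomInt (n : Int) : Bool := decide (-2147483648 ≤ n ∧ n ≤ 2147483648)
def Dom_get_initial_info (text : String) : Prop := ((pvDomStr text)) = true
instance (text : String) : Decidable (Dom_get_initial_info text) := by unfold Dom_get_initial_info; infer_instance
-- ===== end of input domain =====

-- B replaces split-filter-truthiness by a one-pass token-length scan (same cost, no lists).

-- ===== PORT A =====
-- list_words = text.split(' '); list_init = [mot for mot in list_words if len(mot) == 1]; return bool(list_init)
def get_initial_info (text : String) : Bool :=
  match PySem.Str.split? text " " with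
  | none => false   -- unreachable: the separator " " is nonempty
  | some list_words =>
    let list_init := list_words.filter (fun mot => PySem.Str.len mot == 1)
    !list_init.isEmpty

-- ===== PORT B =====
-- run=0; for ch in text: if ch==' ': (if run==1: return True); run=0 else run+=1; return run==1
def getInitialInfoScan : List Char → Nat → Bool
  | [], run => run == 1
  | ch :: rest, run =>
    if ch == ' ' then
      if run == 1 then true else getInitialInfoScan rest 0
    else
      getInitialInfoScan rest (run + 1)

def get_initial_info_alt (text : String) : Bool :=
  getInitialInfoScan text.toList 0

-- ===== PRECONDITION & SPEC =====
def Spec_get_initial_info (text : String) (out : Bool) : Prop := out = get_initial_info_alt text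
instance (text : String) (out : Bool) : Decidable (Spec_get_initial_info text out) := by unfold Spec_get_initial_info; infer_instance

-- ===== CLAIM (what is proved, stated in full; the proofs are below) =====
def Claim_equal_get_initial_info : Prop := ∀ (text : String), Dom_get_initial_info text → Spec_get_initial_info text (get_initial_info text)

-- ===== LEMMAS AND PROOFS =====

theorem scan_space_or (rest : List Char) (run : Nat) :
    getInitialInfoScan (' ' :: rest) run = ((run == 1) || getInitialInfoScan rest 0) := by
  by_cases h : run = 1 <;> simp [getInitialInfoScan, h]

-- invariant for split(' ')'s fuel loop vs the one-pass scan
theorem go_any_eq (l : List Char) : ∀ (fuel : Nat) (cur : List Char) (acc : List (List Char)),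
    l.length < fuel →
    ((PySem.Chars.splitOn.go [' '] fuel l cur acc).any (fun t => t.length == 1))
      = (acc.any (fun t => t.length == 1) || getInitialInfoScan l cur.length) := by
  induction l with
  | nil =>
    intro fuel cur acc h
    match fuel with
    | f + 1 =>
      simp [PySem.Chars.splitOn.go, getInitialInfoScan, Bool.or_comm]
  | cons c rest ih =>
    intro fuel cur acc h
    match fuel with
    | f + 1 =>
      by_cases hc : c = ' '
      · subst hc
        have hpre : [' '].isPrefixOf (' ' :: rest) = true := by simp [List.isPrefixOf]
        rw [show PySem.Chars.splitOn.go [' '] (f + 1) (' ' :: rest) cur acc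
              = PySem.Chars.splitOn.go [' '] f rest [] (cur.reverse :: acc) by
            simp [PySem.Chars.splitOn.go, hpre]]
        rw [ih f [] (cur.reverse :: acc) (by simpa using Nat.lt_of_succ_lt_succ h)]
        simp [scan_space_or, Bool.or_assoc, Bool.or_comm]
      · have hpre : [' '].isPrefixOf (c :: rest) = false := by
          simp [List.isPrefixOf]; exact fun h => hc h.symm
        rw [show PySem.Chars.splitOn.go [' '] (f + 1) (c :: rest) cur acc
              = PySem.Chars.splitOn.go [' '] f rest (c :: cur) acc by
            simp [PySem.Chars.splitOn.go, hpre]]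
        rw [ih f (c :: cur) acc (by simpa using Nat.lt_of_succ_lt_succ h)]
        simp [getInitialInfoScan, hc]

-- ===== VERDICT (by name: the statement is the Claim_ definition above) =====
theorem any_filter_map (ws : List (List Char)) :
    (!(List.filter (fun mot => PySem.Str.len mot == 1) (ws.map String.ofList)).isEmpty)
      = ws.any (fun t => t.length == 1) := by
  induction ws with
  | nil => simp
  | cons t ts ih =>
    by_cases h : t.length = 1 <;>
      simp [PySem.Str.len, h, ← ih]

theorem get_initial_info_spec : Claim_equal_get_initial_info := by
  intro text _
  unfold Spec_get_initial_info get_initial_info_alt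
  have h := go_any_eq text.toList (text.toList.length + 1) [] [] (Nat.lt_succ_self _)
  simp only [List.any_nil, Bool.false_or, List.length_nil] at h
  calc get_initial_info text
      = !(List.filter (fun mot => PySem.Str.len mot == 1)
          ((PySem.Chars.splitOn.go [' '] (text.toList.length + 1) text.toList [] []).map
            String.ofList)).isEmpty := rfl
    _ = (PySem.Chars.splitOn.go [' '] (text.toList.length + 1) text.toList [] []).any
          (fun t => t.length == 1) := any_filter_map _
    _ = getInitialInfoScan text.toList 0 := h
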